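-- pv_equiv track=rewrite | github.com/liupengsay/PyIsTheBestLang | src/basis/brute_force/problem.py | lc_2018
-- ===== SOURCE A (Python) =====
-- from typing import List
--
-- def lc_2018(board: List[List[str]], word: str) -> bool:
--     """
--     url: https://leetcode.cn/problems/check-if-word-can-be-placed-in-crossword/description/
--     tag: brute_force
--     """
--     k = len(word)
--
--     def check(cur):
--         if len(cur) != len(word):
--             return False
--         return all(cur[i] == " " or cur[i] == word[i] for i in range(k))
--
--     def compute(lst):
--         length = len(lst)
--         pre = 0
--         for i in range(length):
--             if lst[i] == "#":
--                 if check([lst[x] for x in range(pre, i)]):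
--                     return True
--                 pre = i + 1
--         if check([lst[x] for x in range(pre, length)]):
--             return True
--         return False
--
--     for tmp in board:
--         if compute(tmp[:]) or compute(tmp[::-1]):
--             return True
--
--     for tmp in zip(*board):
--         if compute(tmp[:]) or compute(tmp[::-1]):
--             return True
--     return False
-- ===== SOURCE B (Python) =====
-- from typing import List
--
-- def lc_2018(board: List[List[str]], word: str) -> bool:
--     k = len(word)
--
--     def placeable(line):
--         n = len(line)
--         for j in range(n - k + 1):
--             if (j == 0 or line[j - 1] == "#") and (j + k == n or line[j + k] == "#"):
--                 win = line[j:j + k]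
--                 if all(c != "#" and (c == " " or c == word[i]) for i, c in enumerate(win)):
--                     return True
--                 if all(c != "#" and (c == " " or c == word[k - 1 - i]) for i, c in enumerate(win)):
--                     return True
--         return False
--
--     return any(placeable(row) for row in board) or any(
--         placeable(list(col)) for col in zip(*board))
-- ===== Notes on version B (the rewrite author's own statement) =====
-- stated objective: alternative
-- what changed: B never splits lines into '#'-separated segments: it enumerates candidate placement start positions directly, accepting a window of length k iff it is bounded by '#' or the line edge on both sides, contains no '#', and matches the word forward or backward; A instead decomposes each line (and its reversal) into segments and compares whole segments.
import Mathlib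
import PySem

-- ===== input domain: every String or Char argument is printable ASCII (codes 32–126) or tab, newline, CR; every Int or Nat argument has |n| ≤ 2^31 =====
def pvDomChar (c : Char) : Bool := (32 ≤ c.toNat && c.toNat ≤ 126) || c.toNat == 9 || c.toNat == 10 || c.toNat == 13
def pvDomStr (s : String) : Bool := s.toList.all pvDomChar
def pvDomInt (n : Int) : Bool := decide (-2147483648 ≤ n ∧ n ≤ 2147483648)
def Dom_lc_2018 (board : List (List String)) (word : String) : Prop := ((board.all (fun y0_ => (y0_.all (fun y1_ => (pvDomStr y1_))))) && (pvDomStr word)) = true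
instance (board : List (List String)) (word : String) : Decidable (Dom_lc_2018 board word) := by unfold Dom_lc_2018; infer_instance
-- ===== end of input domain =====

-- B replaces A's split-into-'#'-segments decomposition (run twice, once on the reversed
-- line) by a direct enumeration of candidate placement windows: start j is accepted iff
-- the k-window is bounded by '#'/edge on both sides, '#'-free, and matches the word
-- forward or backward; objective: alternative algorithm, same exact return value.

-- ===== PORT A =====
-- check(cur): len(cur) == len(word) and all(cur[i] == " " or cur[i] == word[i] for i in range(k))
def pyCheck (wl : List Char) (cur : List String) : Bool :=
  if cur.length ≠ wl.length then false
  else (List.range wl.length).all fun i =>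
    cur.getD i "" == " " || cur.getD i "" == String.ofList [wl.getD i ' ']

-- compute(lst): the index loop with state `pre`, early-returning on a matching segment
def pyComputeAux (wl : List Char) (lst : List String) (pre i : Nat) : Bool :=
  if h : i < lst.length then
    if lst.getD i "" == "#" then
      if pyCheck wl ((List.range' pre (i - pre)).map (fun x => lst.getD x "")) then true
      else pyComputeAux wl lst (i + 1) (i + 1)
    else pyComputeAux wl lst pre (i + 1)
  else pyCheck wl ((List.range' pre (lst.length - pre)).map (fun x => lst.getD x ""))
  termination_by lst.length - i

def pyCompute (wl : List Char) (lst : List String) : Bool :=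
  pyComputeAux wl lst 0 0

-- zip(*board): columns, truncated to the shortest row (empty when board is empty)
def pyZipStar (rows : List (List String)) : List (List String) :=
  match rows with
  | [] => []
  | r :: rs =>
    let m := rs.foldl (fun acc x => min acc x.length) r.length
    (List.range m).map fun j => (r :: rs).map fun row => row.getD j ""

def lc_2018 (board : List (List String)) (word : String) : Bool :=
  (board.any fun tmp => pyCompute word.toList tmp || pyCompute word.toList tmp.reverse) ||
  ((pyZipStar board).any fun tmp => pyCompute word.toList tmp || pyCompute word.toList tmp.reverse)

-- ===== PORT B =====
-- all(c != "#" and (c == " " or c == word[i]) for i, c in enumerate(win))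
def altFwd (wl : List Char) (win : List String) : Bool :=
  (PySem.List.enumerate win).all fun ic =>
    ic.2 != "#" && (ic.2 == " " || ic.2 == String.ofList [PySem.List.pyGetD wl ic.1 ' '])

-- all(c != "#" and (c == " " or c == word[k - 1 - i]) for i, c in enumerate(win))
def altBwd (wl : List Char) (win : List String) : Bool :=
  (PySem.List.enumerate win).all fun ic =>
    ic.2 != "#" && (ic.2 == " " || ic.2 == String.ofList [PySem.List.pyGetD wl ((wl.length : Int) - 1 - ic.1) ' '])

-- placeable(line): for j in range(n - k + 1): boundary test, then the two window matches.
-- Python's range(n - k + 1) is empty when k > n, exactly List.range (n + 1 - k) in Nat;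
-- the slice line[j:j+k] with 0 ≤ j, j + k ≤ n is exactly (line.drop j).take k.
def altPlaceable (wl : List Char) (line : List String) : Bool :=
  (List.range (line.length + 1 - wl.length)).any fun j =>
    ((decide (j = 0) || (line.getD (j - 1) "" == "#")) &&
     (decide (j + wl.length = line.length) || (line.getD (j + wl.length) "" == "#"))) &&
    (altFwd wl ((line.drop j).take wl.length) || altBwd wl ((line.drop j).take wl.length))

def lc_2018_alt (board : List (List String)) (word : String) : Bool :=
  (board.any fun row => altPlaceable word.toList row) ||
  ((pyZipStar board).any fun col => altPlaceable word.toList col)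

-- ===== PRECONDITION & SPEC =====
def Spec_lc_2018 (board : List (List String)) (word : String) (out : Bool) : Prop := out = lc_2018_alt board word
instance (board : List (List String)) (word : String) (out : Bool) : Decidable (Spec_lc_2018 board word out) := by unfold Spec_lc_2018; infer_instance

-- ===== CLAIM (what is proved, stated in full; the proofs are below) =====
def Claim_equal_lc_2018 : Prop := ∀ (board : List (List String)) (word : String), Dom_lc_2018 board word → Spec_lc_2018 board word (lc_2018 board word)

-- ===== LEMMAS AND PROOFS =====

-- prepend a prefix onto the first segment
def consHead (p : List String) : List (List String) → List (List String)
  | [] => [p]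
  | s :: ss => (p ++ s) :: ss

-- segments of a line split at "#" (proof-side characterisation of A's compute)
def segsC : List String → List (List String)
  | [] => [[]]
  | c :: rest => if c == "#" then [] :: segsC rest else consHead [c] (segsC rest)

theorem segsC_ne_nil (l : List String) : segsC l ≠ [] := by
  cases l with
  | nil => simp [segsC]
  | cons c t =>
    simp only [segsC]
    split
    · simp
    · cases h : segsC t <;> simp [consHead]

theorem consHead_nil (ss : List (List String)) (h : ss ≠ []) : consHead [] ss = ss := by
  cases ss with
  | nil => exact absurd rfl h
  | cons s ss => simp [consHead]

-- the comprehension [lst[x] for x in range(pre, i)] is a take-of-drop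
theorem sliceA_eq (lst : List String) (pre i : Nat) (h1 : pre ≤ i) (h2 : i ≤ lst.length) :
    (List.range' pre (i - pre)).map (fun x => lst.getD x "") = (lst.drop pre).take (i - pre) := by
  apply List.ext_getElem
  · simp; omega
  · intro j hj hj'
    simp only [List.getElem_map, List.getElem_range', List.getElem_take, List.getElem_drop]
    rw [List.getD_eq_getElem lst "" (by simp at hj; omega)]
    congr 1
    omega

theorem pyComputeAux_eq (wl : List Char) (lst : List String) :
    ∀ n pre i, i ≤ lst.length → pre ≤ i → n = lst.length - i →
    pyComputeAux wl lst pre i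
      = (consHead ((lst.drop pre).take (i - pre)) (segsC (lst.drop i))).any (pyCheck wl) := by
  intro n
  induction n with
  | zero =>
    intro pre i h1 h2 h3
    have hi : i = lst.length := by omega
    subst hi
    rw [pyComputeAux]
    simp only [lt_irrefl, dite_false]
    rw [sliceA_eq lst pre lst.length h2 (le_refl _)]
    simp [consHead, segsC, List.drop_length]
  | succ n ih =>
    intro pre i h1 h2 h3
    have hi : i < lst.length := by omega
    have hdrop : lst.drop i = lst[i] :: lst.drop (i + 1) := List.drop_eq_getElem_cons hi
    have hgd : lst.getD i "" = lst[i] := List.getD_eq_getElem lst "" hi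
    rw [pyComputeAux]
    simp only [hi, dite_true]
    rw [sliceA_eq lst pre i h2 (by omega)]
    by_cases hc : lst.getD i "" == "#"
    · simp only [hc, if_pos]
      rw [hdrop]
      simp only [segsC, hgd ▸ hc, if_pos]
      rw [ih (i + 1) (i + 1) (by omega) (le_refl _) (by omega)]
      simp only [Nat.sub_self, List.take_zero]
      rw [consHead_nil _ (segsC_ne_nil _)]
      simp only [consHead, List.append_nil, List.any_cons]
      cases pyCheck wl ((lst.drop pre).take (i - pre)) <;> simp
    · simp only [hc, if_neg, Bool.false_eq_true, not_false_iff]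
      rw [ih pre (i + 1) (by omega) (by omega) (by omega)]
      rw [hdrop]
      simp only [segsC, hgd ▸ hc]
      simp only [Bool.false_eq_true, if_false]
      have htake : (lst.drop pre).take (i + 1 - pre) = (lst.drop pre).take (i - pre) ++ [lst[i]] := by
        have : i + 1 - pre = (i - pre) + 1 := by omega
        rw [this, List.take_add_one]
        have : (lst.drop pre)[i - pre]? = some lst[i] := by
          rw [List.getElem?_drop]
          rw [List.getElem?_eq_getElem (by omega)]
          congr 1
          congr 1
          omega
        simp [this]
      rw [htake]
      cases h : segsC (lst.drop (i + 1)) with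
      | nil => exact absurd h (segsC_ne_nil _)
      | cons s ss => simp [consHead, List.append_assoc]

theorem pyCompute_eq (wl : List Char) (lst : List String) :
    pyCompute wl lst = (segsC lst).any (pyCheck wl) := by
  rw [pyCompute, pyComputeAux_eq wl lst (lst.length - 0) 0 0 (by omega) (le_refl _) rfl]
  simp only [List.drop_zero, Nat.sub_self, List.take_zero]
  rw [consHead_nil _ (segsC_ne_nil _)]

-- appending one cell to a line, on the segment list
theorem segsC_snoc (c : String) : ∀ (a : List String),
    segsC (a ++ [c]) = if c == "#" then segsC a ++ [[]]
      else (segsC a).dropLast ++ [((segsC a).getLastD []) ++ [c]] := by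
  intro a
  induction a with
  | nil =>
    by_cases hc : c == "#" <;> simp [segsC, hc, consHead]
  | cons d t ih =>
    by_cases hd : d == "#"
    · simp only [List.cons_append, segsC, hd, if_pos, ih]
      by_cases hc : c == "#"
      · simp [hc]
      · simp only [hc, Bool.false_eq_true, if_false]
        rw [List.dropLast_cons_of_ne_nil (segsC_ne_nil t), List.getLastD_cons]
        simp
    · simp only [List.cons_append, segsC, hd, Bool.false_eq_true, if_false, ih]
      by_cases hc : c == "#"
      · simp only [hc, if_pos]
        cases h : segsC t with
        | nil => exact absurd h (segsC_ne_nil t)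
        | cons s ss => simp [consHead]
      · simp only [hc, Bool.false_eq_true, if_false]
        cases h : segsC t with
        | nil => exact absurd h (segsC_ne_nil t)
        | cons s ss =>
          cases ss with
          | nil => simp [consHead]
          | cons p ps =>
            simp only [consHead, List.dropLast_cons₂, List.getLastD_cons,
              List.cons_append]

theorem segsC_reverse (l : List String) :
    segsC l.reverse = ((segsC l).map List.reverse).reverse := by
  induction l with
  | nil => simp [segsC]
  | cons c t ih =>
    rw [List.reverse_cons, segsC_snoc, ih]
    by_cases hc : c == "#"
    · simp only [hc, if_pos, segsC]
      simp
    · simp only [hc, Bool.false_eq_true, if_false, segsC]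
      cases h : segsC t with
      | nil => exact absurd h (segsC_ne_nil t)
      | cons s ss =>
        simp only [consHead, List.map_cons, List.reverse_cons, List.dropLast_concat,
          List.getLastD_concat]
        simp

-- bridge: an all over enumerate(seg) is an all over range(len(seg)) with getD access
theorem enum_all_eq (s : List String) (P : String → Int → Bool) :
    ((PySem.List.enumerate s).all fun ic => P ic.2 ic.1)
      = (List.range s.length).all fun i => P (s.getD i "") (i : Int) := by
  rw [PySem.List.enumerate_eq_map_pyRange s "",
    show PySem.List.len s = (s.length : Int) from rfl,
    PySem.List.pyRange_zero_natCast, List.map_map, List.all_map]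
  refine List.all_congr rfl fun i => ?_
  simp [PySem.List.pyGetD_natCast]

-- reversed indexing in getD form
theorem getD_reverse (s : List String) (i : Nat) (h : i < s.length) :
    s.reverse.getD i "" = s.getD (s.length - 1 - i) "" := by
  rw [List.getD_eq_getElem _ _ (by simpa using h), List.getD_eq_getElem _ _ (by omega),
    List.getElem_reverse]

-- B's two window matches with the '#'-conjunct dropped (proof-side)
def mND (wl : List Char) (s : List String) : Bool :=
  if s.length ≠ wl.length then false
  else
    ((PySem.List.enumerate s).all fun ic =>
      ic.2 == " " || ic.2 == String.ofList [PySem.List.pyGetD wl ic.1 ' ']) ||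
    ((PySem.List.enumerate s).all fun ic =>
      ic.2 == " " || ic.2 == String.ofList [PySem.List.pyGetD wl ((wl.length : Int) - 1 - ic.1) ' '])

-- per-segment: A's forward check on the segment, or on its reversal, is mND
theorem check_or_rev_eq_mND (wl : List Char) (s : List String) :
    (pyCheck wl s || pyCheck wl s.reverse) = mND wl s := by
  by_cases hlen : s.length = wl.length
  · have hlenr : s.reverse.length = wl.length := by simpa using hlen
    unfold pyCheck mND
    rw [if_neg (fun hh => hh hlen), if_neg (fun hh => hh hlenr), if_neg (fun hh => hh hlen)]
    have hf := enum_all_eq s (fun c j => c == " " || c == String.ofList [PySem.List.pyGetD wl j ' '])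
    have hb := enum_all_eq s (fun c j =>
      c == " " || c == String.ofList [PySem.List.pyGetD wl ((wl.length : Int) - 1 - j) ' '])
    simp only [] at hf hb
    rw [hf, hb, hlen]
    congr 1
    · refine List.all_congr rfl fun i => ?_
      simp [PySem.List.pyGetD_natCast]
    · apply Bool.eq_iff_iff.mpr
      simp only [List.all_eq_true, List.mem_range]
      constructor
      · intro hfa i hi
        have h1 := hfa (wl.length - 1 - i) (by omega)
        rw [getD_reverse s _ (by omega)] at h1
        have e : s.length - 1 - (wl.length - 1 - i) = i := by omega
        rw [e] at h1
        have e2 : ((wl.length : Int) - 1 - (i : Int)) = ((wl.length - 1 - i : Nat) : Int) := by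
          omega
        rw [e2, PySem.List.pyGetD_natCast]
        exact h1
      · intro hfa i hi
        have h1 := hfa (wl.length - 1 - i) (by omega)
        rw [getD_reverse s i (by omega)]
        have e : s.length - 1 - i = wl.length - 1 - i := by omega
        rw [e]
        have e2 : ((wl.length : Int) - 1 - ((wl.length - 1 - i : Nat) : Int)) = (i : Int) := by
          omega
        rw [e2, PySem.List.pyGetD_natCast] at h1
        exact h1
  · have hlenr : ¬ s.reverse.length = wl.length := by simpa using hlen
    simp [pyCheck, mND, hlen]

-- A-side reduction: both compute passes over a line, as one any over its segments
theorem lineA_eq (wl : List Char) (l : List String) :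
    (pyCompute wl l || pyCompute wl l.reverse)
      = (segsC l).any fun s => pyCheck wl s || pyCheck wl s.reverse := by
  rw [pyCompute_eq, pyCompute_eq, segsC_reverse, List.any_reverse, List.any_map]
  apply Bool.eq_iff_iff.mpr
  simp only [Bool.or_eq_true, List.any_eq_true, Function.comp]
  constructor
  · rintro (⟨s, hs, h⟩ | ⟨s, hs, h⟩) <;> exact ⟨s, hs, by simp [h]⟩
  · rintro ⟨s, hs, h | h⟩
    · exact Or.inl ⟨s, hs, h⟩
    · exact Or.inr ⟨s, hs, h⟩

-- segments with their absolute start positions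
def shiftP (ps : List (Nat × List String)) : List (Nat × List String) :=
  ps.map fun p => (p.1 + 1, p.2)

def segsP : List String → List (Nat × List String)
  | [] => [(0, ([] : List String))]
  | c :: t =>
    if c == "#" then (0, []) :: shiftP (segsP t)
    else
      match segsP t with
      | [] => [(0, [c])]
      | (_, s0) :: rest => (0, c :: s0) :: shiftP rest

theorem segsP_head (l : List String) :
    ∃ s0 rest, segsP l = (0, s0) :: rest ∧ ∀ p ∈ rest, 1 ≤ p.1 := by
  induction l with
  | nil => exact ⟨[], [], rfl, by simp⟩
  | cons c t ih =>
    obtain ⟨s0, rest, ht, hrest⟩ := ih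
    by_cases hc : c = "#"
    · refine ⟨[], shiftP (segsP t), by simp [segsP, hc], ?_⟩
      intro p hp
      simp only [shiftP, List.mem_map] at hp
      obtain ⟨q, -, rfl⟩ := hp
      omega
    · refine ⟨c :: s0, shiftP rest, by simp [segsP, hc, ht], ?_⟩
      intro p hp
      simp only [shiftP, List.mem_map] at hp
      obtain ⟨q, -, rfl⟩ := hp
      omega

theorem shiftP_snd (ps : List (Nat × List String)) :
    (shiftP ps).map Prod.snd = ps.map Prod.snd := by
  simp [shiftP, List.map_map, Function.comp]

theorem segsP_snd (l : List String) : (segsP l).map Prod.snd = segsC l := by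
  induction l with
  | nil => rfl
  | cons c t ih =>
    obtain ⟨s0, rest, ht, -⟩ := segsP_head t
    by_cases hc : c = "#"
    · simp [segsP, segsC, hc, shiftP_snd, ih]
    · have hsegs : segsC t = s0 :: rest.map Prod.snd := by rw [← ih, ht]; rfl
      simp [segsP, segsC, hc, ht, hsegs, consHead, shiftP_snd]

-- every positioned segment sits at a '#'/edge-bounded, '#'-free window and is that window
theorem segsP_sound (l : List String) : ∀ j s, (j, s) ∈ segsP l →
    j + s.length ≤ l.length ∧ (j = 0 ∨ l.getD (j - 1) "" = "#") ∧
    (j + s.length = l.length ∨ l.getD (j + s.length) "" = "#") ∧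
    (∀ c ∈ s, c ≠ "#") ∧ s = (l.drop j).take s.length := by
  induction l with
  | nil =>
    intro j s hm
    simp only [segsP, List.mem_singleton, Prod.mk.injEq] at hm
    obtain ⟨rfl, rfl⟩ := hm
    exact ⟨by simp, Or.inl rfl, Or.inl rfl, by simp, by simp⟩
  | cons c t ih =>
    intro j s hm
    by_cases hc : c = "#"
    · simp only [segsP, hc, beq_self_eq_true, if_pos] at hm
      rcases List.mem_cons.mp hm with he | hm'
      · injection he with h1 h2
        subst h1; subst h2
        exact ⟨by simp, Or.inl rfl, Or.inr (by simp [hc]), by simp, by simp⟩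
      · simp only [shiftP, List.mem_map] at hm'
        obtain ⟨q, hq, he⟩ := hm'
        obtain ⟨j', s'⟩ := q
        injection he with h1 h2
        subst h1; subst h2
        obtain ⟨hb, hl, hr, hh, hw⟩ := ih j' s' hq
        refine ⟨by simp; omega, Or.inr ?_, ?_, hh, by simpa using hw⟩
        · cases j' with
          | zero => simp [hc]
          | succ m =>
            rcases hl with h0 | h0
            · omega
            · simpa using h0
        · rcases hr with h0 | h0
          · exact Or.inl (by simp; omega)
          · refine Or.inr ?_
            rw [show j' + 1 + s'.length = (j' + s'.length) + 1 by omega]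
            simpa using h0
    · obtain ⟨s0, rest, hts, hrest⟩ := segsP_head t
      have hmem0 : ((0 : Nat), s0) ∈ segsP t := by rw [hts]; exact List.mem_cons_self ..
      obtain ⟨hb0, -, hr0, hh0, hw0⟩ := ih 0 s0 hmem0
      simp only [segsP, beq_iff_eq, if_neg hc, hts] at hm
      rcases List.mem_cons.mp hm with he | hm'
      · injection he with h1 h2
        subst h1; subst h2
        refine ⟨by simp; omega, Or.inl rfl, ?_, ?_, ?_⟩
        · rcases hr0 with h0 | h0
          · exact Or.inl (by simp; omega)
          · refine Or.inr ?_
            rw [show 0 + (c :: s0).length = s0.length + 1 by simp]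
            simpa using h0
        · intro x hx
          rcases List.mem_cons.mp hx with rfl | hx'
          · exact hc
          · exact hh0 x hx'
        · simpa using hw0
      · simp only [shiftP, List.mem_map] at hm'
        obtain ⟨q, hq, he⟩ := hm'
        obtain ⟨j', s'⟩ := q
        injection he with h1 h2
        subst h1; subst h2
        have hj1 : 1 ≤ j' := hrest _ hq
        have hmem' : (j', s') ∈ segsP t := by rw [hts]; exact List.mem_cons_of_mem _ hq
        obtain ⟨hb, hl, hr, hh, hw⟩ := ih j' s' hmem'
        refine ⟨by simp; omega, Or.inr ?_, ?_, hh, by simpa using hw⟩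
        · obtain ⟨m, rfl⟩ := Nat.exists_eq_succ_of_ne_zero (by omega : j' ≠ 0)
          rcases hl with h0 | h0
          · omega
          · simpa using h0
        · rcases hr with h0 | h0
          · exact Or.inl (by simp; omega)
          · refine Or.inr ?_
            rw [show j' + 1 + s'.length = (j' + s'.length) + 1 by omega]
            simpa using h0

-- every '#'/edge-bounded, '#'-free window is a positioned segment
theorem segsP_complete (l : List String) : ∀ j k, j + k ≤ l.length →
    (j = 0 ∨ l.getD (j - 1) "" = "#") →
    (j + k = l.length ∨ l.getD (j + k) "" = "#") →
    (∀ c ∈ (l.drop j).take k, c ≠ "#") →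
    (j, (l.drop j).take k) ∈ segsP l := by
  induction l with
  | nil =>
    intro j k h1 _ _ _
    have hj : j = 0 := by simp at h1; omega
    have hk : k = 0 := by simp at h1; omega
    subst hj; subst hk
    simp [segsP]
  | cons c t ih =>
    intro j k h1 h2 h3 h4
    cases j with
    | zero =>
      cases k with
      | zero =>
        have hc : c = "#" := by
          rcases h3 with h0 | h0
          · simp at h0
          · simpa using h0
        simp [segsP, hc]
      | succ m =>
        have hc : c ≠ "#" := h4 c (by simp)
        obtain ⟨s0, rest, hts, hrest⟩ := segsP_head t
        have hmt : ((0 : Nat), (t.drop 0).take m) ∈ segsP t := by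
          refine ih 0 m (by simp at h1 ⊢; omega) (Or.inl rfl) ?_ ?_
          · rcases h3 with h0 | h0
            · exact Or.inl (by simp at h0 ⊢; omega)
            · refine Or.inr ?_
              rw [show (0 : Nat) + m = m from by omega]
              have h0' := h0
              rw [show (0 : Nat) + (m + 1) = m + 1 from by omega] at h0'
              simpa using h0'
          · intro x hx
            refine h4 x ?_
            simp only [List.drop_zero, List.take_succ_cons]
            exact List.mem_cons_of_mem c (by simpa using hx)
        rw [hts] at hmt
        rcases List.mem_cons.mp hmt with he | hm'
        · have hs0 : (t.drop 0).take m = s0 := by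
            injection he with h1' h2'
          simp only [segsP, beq_iff_eq, if_neg hc, hts]
          refine List.mem_cons.mpr (Or.inl ?_)
          simp only [List.drop_zero, List.take_succ_cons] at hs0 ⊢
          rw [← hs0]
        · exact absurd (hrest _ hm') (by simp)
    | succ j' =>
      have hb : (c :: t).getD j' "" = "#" := by
        rcases h2 with h0 | h0
        · omega
        · simpa using h0
      have hwin : ((c :: t).drop (j' + 1)).take k = (t.drop j').take k := by simp
      have hright : j' + k = t.length ∨ t.getD (j' + k) "" = "#" := by
        rcases h3 with h0 | h0
        · exact Or.inl (by simp at h0; omega)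
        · refine Or.inr ?_
          rw [show j' + 1 + k = (j' + k) + 1 by omega] at h0
          simpa using h0
      have hleft : j' = 0 ∨ t.getD (j' - 1) "" = "#" := by
        cases j' with
        | zero => exact Or.inl rfl
        | succ m =>
          refine Or.inr ?_
          simpa using hb
      have hhf : ∀ c' ∈ (t.drop j').take k, c' ≠ "#" := by
        intro x hx
        exact h4 x (by rw [hwin]; exact hx)
      have hmt : (j', (t.drop j').take k) ∈ segsP t :=
        ih j' k (by simp at h1; omega) hleft hright hhf
      by_cases hc : c = "#"
      · rw [hwin]
        simp only [segsP, hc, beq_self_eq_true, if_pos]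
        refine List.mem_cons.mpr (Or.inr ?_)
        simp only [shiftP, List.mem_map]
        exact ⟨(j', (t.drop j').take k), hmt, rfl⟩
      · have hj1 : 1 ≤ j' := by
          rcases Nat.eq_zero_or_pos j' with rfl | h
          · exact absurd (by simpa using hb) hc
          · exact h
        obtain ⟨s0, rest, hts, hrest⟩ := segsP_head t
        rw [hts] at hmt
        rcases List.mem_cons.mp hmt with he | hm'
        · exact absurd (by injection he with h1' h2'; omega : False) (by simp)
        · rw [hwin]
          simp only [segsP, beq_iff_eq, if_neg hc, hts]
          refine List.mem_cons.mpr (Or.inr ?_)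
          simp only [shiftP, List.mem_map]
          exact ⟨(j', (t.drop j').take k), hm', rfl⟩

-- Bool all distributes over a pointwise conjunction
theorem all_and_distrib {α : Type} (l : List α) (p q : α → Bool) :
    (l.all fun x => p x && q x) = (l.all p && l.all q) := by
  induction l with
  | nil => rfl
  | cons a t ih =>
    simp only [List.all_cons, ih]
    cases p a <;> cases q a <;> simp

-- an all over enumerate ignoring the index is a plain all
theorem enum_all_snd (s : List String) (p : String → Bool) :
    ((PySem.List.enumerate s).all fun ic => p ic.2) = s.all p := by
  rw [enum_all_eq s (fun c _ => p c)]
  apply Bool.eq_iff_iff.mpr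
  simp only [List.all_eq_true, List.mem_range]
  constructor
  · intro h c hc
    obtain ⟨i, hi, rfl⟩ := List.mem_iff_getElem.mp hc
    have := h i hi
    rwa [List.getD_eq_getElem _ _ hi] at this
  · intro h i hi
    rw [List.getD_eq_getElem _ _ hi]
    exact h _ (List.getElem_mem hi)

-- per-window: B's two matches equal '#'-freeness plus mND (when the window has length k)
theorem win_eq (wl : List Char) (win : List String) (hlen : win.length = wl.length) :
    (altFwd wl win || altBwd wl win) = ((win.all fun c => c != "#") && mND wl win) := by
  unfold altFwd altBwd mND
  rw [if_neg (fun hh => hh hlen)]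
  rw [all_and_distrib, all_and_distrib, enum_all_snd win (fun c => c != "#")]
  cases win.all fun c => c != "#" <;> simp

-- per-line: B's window scan equals A's segment scan
theorem lineB_eq (wl : List Char) (l : List String) :
    altPlaceable wl l = (segsC l).any fun s => pyCheck wl s || pyCheck wl s.reverse := by
  rw [← segsP_snd, List.any_map]
  apply Bool.eq_iff_iff.mpr
  unfold altPlaceable
  simp only [List.any_eq_true, List.mem_range, Bool.and_eq_true, Bool.or_eq_true,
    decide_eq_true_eq, beq_iff_eq, Function.comp]
  constructor
  · rintro ⟨j, hj, ⟨hL, hR⟩, hM⟩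
    have hjk : j + wl.length ≤ l.length := by omega
    have hwl : ((l.drop j).take wl.length).length = wl.length := by
      simp [List.length_take, List.length_drop]; omega
    have hM' : (altFwd wl ((l.drop j).take wl.length)
        || altBwd wl ((l.drop j).take wl.length)) = true := by
      rcases hM with h | h <;> simp [h]
    rw [win_eq wl _ hwl, Bool.and_eq_true] at hM'
    obtain ⟨hHF, hND⟩ := hM'
    have hhf : ∀ c ∈ (l.drop j).take wl.length, c ≠ "#" := by
      intro c hc
      simpa using List.all_eq_true.mp hHF c hc
    have hmem := segsP_complete l j wl.length hjk hL hR hhf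
    refine ⟨(j, (l.drop j).take wl.length), hmem, ?_⟩
    show pyCheck wl ((l.drop j).take wl.length) = true
      ∨ pyCheck wl ((l.drop j).take wl.length).reverse = true
    rw [← Bool.or_eq_true, check_or_rev_eq_mND]
    exact hND
  · rintro ⟨⟨j, s⟩, hmem, hP⟩
    have hP' : (pyCheck wl s || pyCheck wl s.reverse) = true := by
      rw [Bool.or_eq_true]; exact hP
    obtain ⟨hb, hL, hR, hh, hw⟩ := segsP_sound l j s hmem
    have hslen : s.length = wl.length := by
      by_contra hne
      rw [check_or_rev_eq_mND, mND, if_pos hne] at hP'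
      exact Bool.false_ne_true hP'
    refine ⟨j, by omega, ⟨hL, by rw [← hslen]; exact hR⟩, ?_⟩
    have hwin : (l.drop j).take wl.length = s := by rw [← hslen, ← hw]
    show altFwd wl ((l.drop j).take wl.length) = true
      ∨ altBwd wl ((l.drop j).take wl.length) = true
    rw [← Bool.or_eq_true, hwin, win_eq wl s hslen, Bool.and_eq_true]
    exact ⟨List.all_eq_true.mpr fun c hc => by simpa using hh c hc,
      by rw [← check_or_rev_eq_mND]; exact hP'⟩

-- ===== VERDICT (by name: the statement is the Claim_ definition above) =====
theorem lc_2018_spec : Claim_equal_lc_2018 := by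
  intro board word _
  show lc_2018 board word = lc_2018_alt board word
  unfold lc_2018 lc_2018_alt
  exact congrArg₂ (· || ·)
    (List.any_congr rfl fun l => (lineA_eq word.toList l).trans (lineB_eq word.toList l).symm)
    (List.any_congr rfl fun l => (lineA_eq word.toList l).trans (lineB_eq word.toList l).symm)
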